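-- pv_equiv track=rewrite | github.com/zhoululululu/kuaishang_auto | commonfunc/common_function.py | get_mult_tf
-- ===== SOURCE A (Python) =====
-- def get_mult_tf(bz_list, re_list):
--     """
--     判断妇科多意图中意图标签是否匹配，相等，并输出TRUE，FALSE值
--     :param str1: 第一个意图对（一个或多个标签）
--     :param str2：第二个意图对（一个或多个标签）
--     :return tf：返回是否匹配：TRUE或FALSE（根据标注验收规范）
--     """
--     tf = "FALSE"
--     if len(bz_list) == 1:
--         if len(re_list) == 1:
--             if bz_list == re_list:
--                 tf = "TRUE"
--             else:
--                 tf = "FALSE"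
--         elif len(re_list) == 2:
--             for re_value in re_list:
--                 if re_value in bz_list:
--                     tf = "TRUE"
--         else:
--             tf = "FALSE"
--     elif len(bz_list) == 2:
--         if len(re_list) <= 2:
--             for re_value in re_list:
--                 if re_value in bz_list:
--                     tf = "TRUE"
--         elif len(re_list) == 3:
--             n = 0
--             for re_value in re_list:
--                 if re_value in bz_list:
--                     n = n + 1
--                     if n >= 2:
--                         tf = "TRUE"
--         else:
--             tf = "FALSE"
--     elif len(bz_list) == 3:
--         if len(re_list) == 1:
--             tf = "FALSE"
--         elif len(re_list) in range(2, 4):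
--             n = 0
--             for re_value in re_list:
--                 if re_value in bz_list:
--                     n = n + 1
--                     if n >= 2:
--                         tf = "TRUE"
--     else:
--         tf = "FALSE"
--     return tf
-- ===== SOURCE B (Python) =====
-- NEED = {(1, 1): 1, (1, 2): 1, (2, 0): 1, (2, 1): 1, (2, 2): 1,
--         (2, 3): 2, (3, 2): 2, (3, 3): 2}
--
--
-- def get_mult_tf(bz_list, re_list):
--     need = NEED.get((len(bz_list), len(re_list)))
--     if need is None:
--         return "FALSE"
--     return _hunt(set(bz_list), re_list, need)
--
--
-- def _hunt(members, rest, need):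
--     if need == 0:
--         return "TRUE"
--     if not rest:
--         return "FALSE"
--     return _hunt(members, rest[1:], need - (rest[0] in members))
-- ===== Notes on version B (the rewrite author's own statement) =====
-- stated objective: alternative
-- what changed: Replaces A's nested branch-specific flag loops (and the bz==re list comparison) by a module-level requirement dict keyed by the two lengths plus a short-circuiting recursive search over re_list against set(bz_list) that returns TRUE as soon as the required number of matches is found.
import Mathlib
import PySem

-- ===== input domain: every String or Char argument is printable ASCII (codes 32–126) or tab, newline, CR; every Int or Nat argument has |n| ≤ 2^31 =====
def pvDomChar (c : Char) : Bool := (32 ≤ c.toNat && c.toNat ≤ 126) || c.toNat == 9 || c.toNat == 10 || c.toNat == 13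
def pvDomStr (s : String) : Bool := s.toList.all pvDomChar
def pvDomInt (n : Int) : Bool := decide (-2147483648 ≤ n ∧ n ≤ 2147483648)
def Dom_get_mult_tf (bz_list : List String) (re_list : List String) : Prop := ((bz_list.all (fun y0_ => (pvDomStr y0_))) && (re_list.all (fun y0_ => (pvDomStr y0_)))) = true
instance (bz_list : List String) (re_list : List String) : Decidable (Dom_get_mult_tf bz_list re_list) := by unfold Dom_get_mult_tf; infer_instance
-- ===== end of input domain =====

-- B replaces A's nested branch-specific flag loops by a requirement table (a dict keyed by the
-- two lengths) plus a short-circuiting recursive search over re_list (objective: alternative, same cost).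

-- ===== PORT A =====
-- literal transliteration: each Python `for` loop becomes a foldl over the same state
def get_mult_tf (bz_list : List String) (re_list : List String) : String :=
  let tf := "FALSE"
  if bz_list.length = 1 then
    if re_list.length = 1 then
      if bz_list = re_list then "TRUE" else "FALSE"
    else if re_list.length = 2 then
      re_list.foldl (fun tf re_value => if bz_list.contains re_value then "TRUE" else tf) tf
    else "FALSE"
  else if bz_list.length = 2 then
    if re_list.length ≤ 2 then
      re_list.foldl (fun tf re_value => if bz_list.contains re_value then "TRUE" else tf) tf
    else if re_list.length = 3 then
      (re_list.foldl (fun (s : String × Nat) re_value =>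
        if bz_list.contains re_value then
          let n := s.2 + 1
          (if n ≥ 2 then "TRUE" else s.1, n)
        else s) (tf, 0)).1
    else "FALSE"
  else if bz_list.length = 3 then
    if re_list.length = 1 then "FALSE"
    else if re_list.length = 2 ∨ re_list.length = 3 then
      (re_list.foldl (fun (s : String × Nat) re_value =>
        if bz_list.contains re_value then
          let n := s.2 + 1
          (if n ≥ 2 then "TRUE" else s.1, n)
        else s) (tf, 0)).1
    else tf
  else "FALSE"

-- ===== PORT B =====
-- the module-level requirement table NEED
def pvNEED : PySem.Dict (Nat × Nat) Nat :=
  PySem.Dict.ofList [((1, 1), 1), ((1, 2), 1), ((2, 0), 1), ((2, 1), 1), ((2, 2), 1),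
                     ((2, 3), 2), ((3, 2), 2), ((3, 3), 2)]

-- _hunt: recursive short-circuit search, `rest[0] in members` ported as Set.contains
def pvHunt (members : PySem.Set String) (rest : List String) (need : Nat) : String :=
  if need = 0 then "TRUE"
  else
    match rest with
    | [] => "FALSE"
    | x :: rs => pvHunt members rs (need - (if PySem.Set.contains members x then 1 else 0))

def get_mult_tf_alt (bz_list : List String) (re_list : List String) : String :=
  match PySem.Dict.get? pvNEED (bz_list.length, re_list.length) with
  | none => "FALSE"
  | some need => pvHunt (PySem.Set.ofList bz_list) re_list need

-- ===== PRECONDITION & SPEC =====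
def Spec_get_mult_tf (bz_list : List String) (re_list : List String) (out : String) : Prop := out = get_mult_tf_alt bz_list re_list
instance (bz_list : List String) (re_list : List String) (out : String) : Decidable (Spec_get_mult_tf bz_list re_list out) := by unfold Spec_get_mult_tf; infer_instance

-- ===== CLAIM (what is proved, stated in full; the proofs are below) =====
def Claim_equal_get_mult_tf : Prop := ∀ (bz_list : List String) (re_list : List String), Dom_get_mult_tf bz_list re_list → Spec_get_mult_tf bz_list re_list (get_mult_tf bz_list re_list)

-- ===== LEMMAS AND PROOFS =====

-- the table, as a function of the two lengths
theorem pvNEED_get (b r : Nat) :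
    PySem.Dict.get? pvNEED (b, r) =
      if b = 1 ∧ (r = 1 ∨ r = 2) then some 1
      else if b = 2 ∧ r ≤ 2 then some 1
      else if b = 2 ∧ r = 3 then some 2
      else if b = 3 ∧ (r = 2 ∨ r = 3) then some 2
      else none := by
  split_ifs with h1 h2 h3 h4
  · obtain ⟨rfl, hr⟩ := h1; rcases hr with rfl | rfl <;> decide
  · obtain ⟨rfl, hr⟩ := h2; interval_cases r <;> decide
  · obtain ⟨rfl, rfl⟩ := h3; decide
  · obtain ⟨rfl, hr⟩ := h4; rcases hr with rfl | rfl <;> decide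
  · rw [PySem.Dict.get?_eq_none_iff_not_mem_keys]
    have hk : pvNEED.keys = [(1, 1), (1, 2), (2, 0), (2, 1), (2, 2), (2, 3), (3, 2), (3, 3)] := by decide
    rw [hk]
    simp only [List.mem_cons, List.not_mem_nil, Prod.mk.injEq, or_false]
    omega

-- membership in set(bz_list) is membership in bz_list
theorem contains_ofList_eq (bz : List String) (x : String) :
    PySem.Set.contains (PySem.Set.ofList bz) x = bz.contains x := by
  simp [PySem.Set.contains, List.contains_eq_mem, PySem.Set.mem_ofList]

-- B's recursive search, characterised by the match count
theorem hunt_char (m : PySem.Set String) : ∀ (rest : List String) (need : Nat),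
    pvHunt m rest need
      = if need ≤ rest.countP (fun x => PySem.Set.contains m x) then "TRUE" else "FALSE" := by
  intro rest
  induction rest with
  | nil =>
    intro need
    rw [pvHunt]
    simp only [List.countP_nil]
    split_ifs <;> first | rfl | omega
  | cons x rs ih =>
    intro need
    rw [pvHunt, List.countP_cons]
    by_cases h : PySem.Set.contains m x = true
    · rw [if_pos h, ih]
      split_ifs <;> first | rfl | omega
    · rw [if_neg h, ih]
      split_ifs <;> first | rfl | omega

-- A's "set TRUE on any match" loop, characterised by the match count
theorem loop1 (bz : List String) : ∀ (re : List String) (tf : String),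
    re.foldl (fun tf v => if bz.contains v then "TRUE" else tf) tf
      = if re.countP (fun x => bz.contains x) ≥ 1 then "TRUE" else tf := by
  intro re
  induction re with
  | nil => intro tf; simp
  | cons v re ih =>
    intro tf
    rw [List.foldl_cons, List.countP_cons]
    by_cases h : bz.contains v = true
    · rw [if_pos h, if_pos h, ih]
      split_ifs <;> first | rfl | omega
    · rw [if_neg h, if_neg h, ih]
      split_ifs <;> first | rfl | omega

-- A's "set TRUE on the second match" loop, characterised by the count and start state
theorem loop2 (bz : List String) : ∀ (re : List String) (tf : String) (n : Nat),
    (re.foldl (fun (s : String × Nat) v =>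
        if bz.contains v then
          let k := s.2 + 1
          (if k ≥ 2 then "TRUE" else s.1, k)
        else s) (tf, n)).1
      = if n + re.countP (fun x => bz.contains x) ≥ 2 ∧ re.countP (fun x => bz.contains x) ≥ 1
        then "TRUE" else tf := by
  intro re
  induction re with
  | nil => intro tf n; simp
  | cons v re ih =>
    intro tf n
    rw [List.foldl_cons, List.countP_cons]
    by_cases h : bz.contains v = true
    · rw [if_pos h, if_pos h]
      show (re.foldl _ (if n + 1 ≥ 2 then "TRUE" else tf, n + 1)).1 = _
      rw [ih]
      split_ifs <;> first | rfl | omega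
    · rw [if_neg h, if_neg h, ih]
      split_ifs <;> first | rfl | omega

-- the bz = [a], re = [b] branch: list equality agrees with a match in the singleton
theorem single_case (a b : String) :
    (if ([a] : List String) = [b] then "TRUE" else "FALSE")
      = (if List.countP (fun x => ([a] : List String).contains x) [b] ≥ 1 then "TRUE" else "FALSE") := by
  by_cases h : a = b
  · subst h; simp
  · have hc : ([a] : List String).contains b = false := by
      simp only [List.contains_eq_mem, List.mem_singleton, decide_eq_false_iff_not]
      exact fun e => h e.symm
    rw [if_neg (by simp [h]), List.countP_cons, List.countP_nil, hc]
    simp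

-- ===== VERDICT (by name: the statement is the Claim_ definition above) =====
set_option maxHeartbeats 1600000 in
theorem get_mult_tf_spec : Claim_equal_get_mult_tf := by
  intro bz re _
  unfold Spec_get_mult_tf get_mult_tf get_mult_tf_alt
  rw [pvNEED_get]
  have hc : re.countP (fun x => PySem.Set.contains (PySem.Set.ofList bz) x)
      = re.countP (fun x => bz.contains x) :=
    List.countP_congr (fun x _ => by rw [contains_ofList_eq])
  by_cases h11 : bz.length = 1 ∧ re.length = 1
  · obtain ⟨a, rfl⟩ := List.length_eq_one_iff.mp h11.1
    obtain ⟨b, rfl⟩ := List.length_eq_one_iff.mp h11.2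
    simp only [List.length_singleton, hunt_char, hc, single_case]
    norm_num
  · simp only [hunt_char, hc, loop1, loop2, Nat.zero_add]
    generalize re.countP (fun x => bz.contains x) = c
    split_ifs <;> first | rfl | omega |
      (simp only []; split_ifs <;> first | rfl | omega)
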